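-- pv_equiv track=rewrite | github.com/sciencenerd-des/Resume_Projects | Project_3/src/tools/email_validator.py | is_role_based_email
-- ===== SOURCE A (Python) =====
-- from typing import Tuple, List, Dict, Any, Optional
--
-- ROLE_BASED_PREFIXES = [
--     'info', 'support', 'admin', 'webmaster', 'postmaster',
--     'sales', 'marketing', 'contact', 'hello', 'help',
--     'noreply', 'no-reply', 'donotreply', 'do-not-reply',
--     'abuse', 'spam', 'hostmaster', 'billing', 'accounts',
--     'feedback', 'mail', 'office', 'team', 'jobs', 'careers',
--     'hr', 'press', 'media', 'legal', 'privacy', 'security'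
-- ]
--
-- def is_role_based_email(email: str) -> Tuple[bool, str]:
--     """
--     Check if email is a role-based address (info@, support@, etc.)
--
--     Args:
--         email: Email address to check
--
--     Returns:
--         Tuple of (is_role_based, message)
--     """
--     if '@' not in email:
--         return False, "Invalid email format"
--
--     local_part = email.split('@')[0].lower()
--
--     for prefix in ROLE_BASED_PREFIXES:
--         if local_part == prefix or local_part.startswith(f"{prefix}.") or local_part.startswith(f"{prefix}_"):
--             return True, f"Role-based email: {prefix}@"
--
--     return False, "Personal email address"
-- ===== SOURCE B (Python) =====
-- ROLE_BASED_PREFIXES = [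
--     'info', 'support', 'admin', 'webmaster', 'postmaster',
--     'sales', 'marketing', 'contact', 'hello', 'help',
--     'noreply', 'no-reply', 'donotreply', 'do-not-reply',
--     'abuse', 'spam', 'hostmaster', 'billing', 'accounts',
--     'feedback', 'mail', 'office', 'team', 'jobs', 'careers',
--     'hr', 'press', 'media', 'legal', 'privacy', 'security'
-- ]
--
-- ROLE_SET = frozenset(ROLE_BASED_PREFIXES)
--
--
-- def is_role_based_email(email):
--     if '@' not in email:
--         return False, "Invalid email format"
--     local_part = email.split('@')[0].lower()
--     # head = the token before the first '.' or '_' separator (whole string if none)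
--     head = local_part
--     for i, ch in enumerate(local_part):
--         if ch == '.' or ch == '_':
--             head = local_part[:i]
--             break
--     if head in ROLE_SET:
--         return True, f"Role-based email: {head}@"
--     return False, "Personal email address"
-- ===== Notes on version B (the rewrite author's own statement) =====
-- stated objective: simpler
-- what changed: Replaces A's scan over all 31 role prefixes (three string comparisons per prefix) by extracting the local part's leading token before the first dot or underscore separator once and testing it against a frozenset of the prefixes.
import Mathlib
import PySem

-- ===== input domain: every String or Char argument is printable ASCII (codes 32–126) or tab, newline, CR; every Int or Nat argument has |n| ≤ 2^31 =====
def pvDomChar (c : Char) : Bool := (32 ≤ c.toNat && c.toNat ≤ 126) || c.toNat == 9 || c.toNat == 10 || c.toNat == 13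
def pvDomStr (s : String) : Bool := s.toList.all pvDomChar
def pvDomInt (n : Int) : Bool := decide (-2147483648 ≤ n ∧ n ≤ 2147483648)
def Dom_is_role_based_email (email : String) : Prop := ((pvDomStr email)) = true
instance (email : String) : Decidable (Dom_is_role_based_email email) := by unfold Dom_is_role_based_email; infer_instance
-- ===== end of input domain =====

-- B replaces A's scan over all 31 prefixes by extracting the token before the
-- first '.'/'_' separator once and looking it up in a set (objective: simpler).

def ROLE_BASED_PREFIXES : List String := [
    "info", "support", "admin", "webmaster", "postmaster",
    "sales", "marketing", "contact", "hello", "help",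
    "noreply", "no-reply", "donotreply", "do-not-reply",
    "abuse", "spam", "hostmaster", "billing", "accounts",
    "feedback", "mail", "office", "team", "jobs", "careers",
    "hr", "press", "media", "legal", "privacy", "security"]

-- ===== PORT A =====
-- A's 'for prefix in ROLE_BASED_PREFIXES: if … return …' loop, step for step
def isRoleLoopA (lp : List Char) : List String → Bool × String
  | [] => (false, "Personal email address")
  | p :: rest =>
      if lp == p.toList
         || PySem.Chars.startswith lp (p.toList ++ ['.'])
         || PySem.Chars.startswith lp (p.toList ++ ['_'])
      then (true, String.ofList ("Role-based email: ".toList ++ p.toList ++ "@".toList))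
      else isRoleLoopA lp rest

def is_role_based_email (email : String) : Bool × String :=
  if PySem.Str.isIn "@" email = false then (false, "Invalid email format")
  else
    -- email.split('@')[0]: split always yields a nonempty list, so [0] is its head
    let local_part := PySem.Chars.lower ((PySem.Chars.splitOn email.toList "@".toList).headD [])
    isRoleLoopA local_part ROLE_BASED_PREFIXES

-- ===== PORT B =====
-- Source B's 'for i, ch in enumerate(local_part): if ch in "._": head = local_part[:i]; break'
def headTok : List Char → List Char
  | [] => []
  | c :: rest => if c == '.' || c == '_' then [] else c :: headTok rest

def is_role_based_email_alt (email : String) : Bool × String :=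
  if PySem.Str.isIn "@" email = false then (false, "Invalid email format")
  else
    let local_part := PySem.Chars.lower ((PySem.Chars.splitOn email.toList "@".toList).headD [])
    let head := headTok local_part
    if (PySem.Set.ofList ROLE_BASED_PREFIXES).contains (String.ofList head)
    then (true, String.ofList ("Role-based email: ".toList ++ head ++ "@".toList))
    else (false, "Personal email address")

-- ===== PRECONDITION & SPEC =====
def Spec_is_role_based_email (email : String) (out : Bool × String) : Prop := out = is_role_based_email_alt email
instance (email : String) (out : Bool × String) : Decidable (Spec_is_role_based_email email out) := by unfold Spec_is_role_based_email; infer_instance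

-- ===== CLAIM (what is proved, stated in full; the proofs are below) =====
def Claim_equal_is_role_based_email : Prop := ∀ (email : String), Dom_is_role_based_email email → Spec_is_role_based_email email (is_role_based_email email)

-- ===== LEMMAS AND PROOFS =====

-- A prefix containing no separator matches A's test exactly when it IS the head token
lemma match_iff (p : List Char) (hp : p.all (fun c => !(c == '.' || c == '_')) = true)
    (lp : List Char) :
    (lp == p || PySem.Chars.startswith lp (p ++ ['.'])
             || PySem.Chars.startswith lp (p ++ ['_'])) = true ↔ headTok lp = p := by
  induction p generalizing lp with
  | nil =>
      cases lp with
      | nil => simp [headTok]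
      | cons c r =>
          by_cases h1 : c = '.' <;> by_cases h2 : c = '_' <;>
            [skip; skip; skip;
             (have h1' : ¬('.' = c) := fun h => h1 h.symm;
              have h2' : ¬('_' = c) := fun h => h2 h.symm)] <;>
            simp_all [headTok, List.cons_prefix_cons, PySem.Chars.startswith_iff]
  | cons a p' ih =>
      simp only [List.all_cons, Bool.and_eq_true, Bool.not_eq_true', Bool.or_eq_false_iff,
        beq_eq_false_iff_ne] at hp
      obtain ⟨⟨ha1, ha2⟩, hp'⟩ := hp
      cases lp with
      | nil =>
          simp [headTok, PySem.Chars.startswith_iff]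
      | cons c r =>
          have hIH := ih hp' r
          by_cases hc : c = a
          · subst hc
            have hsep : ¬(c = '.' ∨ c = '_') := by tauto
            simp_all [headTok, List.cons_prefix_cons, PySem.Chars.startswith_iff,
              List.cons_append]
          · have ha1' : ¬(a = '.') ∨ True := Or.inr trivial
            by_cases h1 : c = '.' <;> by_cases h2 : c = '_' <;>
              (try subst h1) <;> (try subst h2) <;>
              simp_all [headTok, List.cons_prefix_cons, PySem.Chars.startswith_iff,
                List.cons_append, Ne.symm, fun (x y : Char) => (eq_comm : x = y ↔ y = x)]

lemma roles_nosep : ∀ p ∈ ROLE_BASED_PREFIXES,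
    p.toList.all (fun c => !(c == '.' || c == '_')) = true := by decide

-- A's loop over a separator-free prefix list = membership test on the head token
lemma loopA_eq (lp : List Char) (L : List String)
    (h : ∀ p ∈ L, p.toList.all (fun c => !(c == '.' || c == '_')) = true) :
    isRoleLoopA lp L =
      if String.ofList (headTok lp) ∈ L
      then (true, String.ofList ("Role-based email: ".toList ++ headTok lp ++ "@".toList))
      else (false, "Personal email address") := by
  induction L with
  | nil => simp [isRoleLoopA]
  | cons p rest ih =>
      rw [isRoleLoopA]
      by_cases hm : headTok lp = p.toList
      · have hc : (lp == p.toList || PySem.Chars.startswith lp (p.toList ++ ['.'])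
             || PySem.Chars.startswith lp (p.toList ++ ['_'])) = true :=
          (match_iff p.toList (h p (by simp)) lp).mpr hm
        simp [hc, hm, String.ofList_toList]
      · have hc : (lp == p.toList || PySem.Chars.startswith lp (p.toList ++ ['.'])
             || PySem.Chars.startswith lp (p.toList ++ ['_'])) = false := by
          rw [Bool.eq_false_iff]
          intro hcontra
          exact hm ((match_iff p.toList (h p (by simp)) lp).mp hcontra)
        rw [hc, ih (fun q hq => h q (by simp [hq]))]
        have : String.ofList (headTok lp) ∈ p :: rest ↔ String.ofList (headTok lp) ∈ rest := by
          constructor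
          · intro hx
            rcases List.mem_cons.mp hx with hx | hx
            · exact absurd (String.toList_inj.mpr hx) (by simpa using hm)
            · exact hx
          · exact List.mem_cons_of_mem p
        simp only [Bool.false_eq_true, if_false, this]

lemma set_contains_roles (x : String) :
    (PySem.Set.ofList ROLE_BASED_PREFIXES).contains x = decide (x ∈ ROLE_BASED_PREFIXES) := by
  have h : PySem.Set.ofList ROLE_BASED_PREFIXES = ROLE_BASED_PREFIXES := by decide
  rw [h]
  simp [PySem.Set.contains]

-- ===== VERDICT (by name: the statement is the Claim_ definition above) =====
theorem is_role_based_email_spec : Claim_equal_is_role_based_email := by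
  intro email _
  unfold Spec_is_role_based_email
  simp only [is_role_based_email, is_role_based_email_alt, set_contains_roles,
    decide_eq_true_iff]
  rw [loopA_eq _ _ roles_nosep]
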